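-- pv_equiv track=rewrite | github.com/f-martini/SympleQ | scripts/experiments/symmetries/src/permutations_matroid.py | _apply_perm_to_presentation
-- ===== SOURCE A (Python) =====
-- from collections import defaultdict, deque, Counter
-- from typing import Dict, List, Tuple, Callable, Optional, Set
--
-- def _apply_perm_to_presentation(independent: List[int],
--                                 dependencies: Dict[int, List[Tuple[int, int]]],
--                                 perm: Dict[int, int]) -> Tuple[List[int], Dict[int, List[Tuple[int, int]]]]:
--     """
--     Apply label permutation to the presentation:
--       - independents are relabeled
--       - dependent equations are relabeled on both LHS and RHS.
--     """
--     indep2 = [perm[i] for i in independent]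
--     deps2: Dict[int, List[Tuple[int, int]]] = {}
--     for d, pairs in dependencies.items():
--         d2 = perm[d]
--         acc = defaultdict(int)
--         for j, m in pairs:
--             acc[perm[j]] = (acc[perm[j]] + m)
--         # keep integer multiplicities; mod p happens when building vectors
--         deps2[d2] = sorted(acc.items(), key=lambda x: x[0])
--     return indep2, deps2
-- ===== SOURCE B (Python) =====
-- from typing import Dict, List, Tuple
--
--
-- def _group(keyed: List[Tuple[int, int]]) -> List[Tuple[int, int]]:
--     """Sum multiplicities of adjacent equal keys in a key-sorted list."""
--     if not keyed:
--         return []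
--     out = []
--     k, s = keyed[0]
--     for k2, m in keyed[1:]:
--         if k2 == k:
--             s += m
--         else:
--             out.append((k, s))
--             k, s = k2, m
--     out.append((k, s))
--     return out
--
--
-- def _apply_perm_to_presentation(independent: List[int],
--                                 dependencies: Dict[int, List[Tuple[int, int]]],
--                                 perm: Dict[int, int]) -> Tuple[List[int], Dict[int, List[Tuple[int, int]]]]:
--     indep2 = [perm[i] for i in independent]
--     deps2: Dict[int, List[Tuple[int, int]]] = {}
--     for d, pairs in dependencies.items():
--         keyed = sorted(((perm[j], m) for j, m in pairs), key=lambda t: t[0])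
--         deps2[perm[d]] = _group(keyed)
--     return indep2, deps2
-- ===== Notes on version B (the rewrite author's own statement) =====
-- stated objective: alternative
-- what changed: Replaces the per-dependency defaultdict hash accumulation followed by a sort of the dict items with sort-first-then-adjacency-grouping: relabel the pairs, sort them by the permuted key, and sum runs of equal adjacent keys in one linear pass, with no intermediate dict.
import Mathlib
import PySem

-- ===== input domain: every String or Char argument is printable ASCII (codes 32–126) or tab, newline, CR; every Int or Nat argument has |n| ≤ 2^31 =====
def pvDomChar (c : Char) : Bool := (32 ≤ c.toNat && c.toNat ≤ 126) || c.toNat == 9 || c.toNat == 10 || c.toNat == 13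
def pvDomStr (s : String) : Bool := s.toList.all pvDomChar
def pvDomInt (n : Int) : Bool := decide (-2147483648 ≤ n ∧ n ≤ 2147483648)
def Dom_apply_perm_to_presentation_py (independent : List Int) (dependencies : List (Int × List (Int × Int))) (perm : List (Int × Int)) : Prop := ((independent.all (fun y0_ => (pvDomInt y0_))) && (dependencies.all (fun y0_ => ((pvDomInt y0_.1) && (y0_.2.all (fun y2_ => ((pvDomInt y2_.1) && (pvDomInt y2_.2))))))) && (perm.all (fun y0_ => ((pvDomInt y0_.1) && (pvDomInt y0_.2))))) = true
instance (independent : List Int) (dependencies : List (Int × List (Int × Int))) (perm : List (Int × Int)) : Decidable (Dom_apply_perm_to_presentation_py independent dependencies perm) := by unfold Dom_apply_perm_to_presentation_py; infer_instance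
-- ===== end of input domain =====

-- B replaces the per-dependency defaultdict accumulation followed by a sort of the dict items
-- with sort-first-then-adjacency-grouping (relabel, sort by permuted key, sum runs of equal keys);
-- objective: alternative decomposition, same cost. Equivalence is about return values only.

-- ===== PORT A =====
-- perm[x] (Pre_ guarantees the key is present, so the default is never returned)
def pvPermGet (perm : List (Int × Int)) (x : Int) : Int :=
  (PySem.Dict.ofList perm).getD x 0

def apply_perm_to_presentation_py (independent : List Int) (dependencies : List (Int × List (Int × Int))) (perm : List (Int × Int)) : List Int × (List (Int × List (Int × Int))) :=
  let indep2 := independent.map (fun i => pvPermGet perm i)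
  let deps2 :=
    (PySem.Dict.ofList dependencies).items.foldl
      (fun deps2 dp =>
        let d2 := pvPermGet perm dp.1
        let acc := dp.2.foldl
          (fun acc jm => acc.modify (pvPermGet perm jm.1) 0 (fun v => v + jm.2))
          PySem.Dict.empty
        deps2.insert d2 (PySem.List.sorted acc.items (fun x => x.1) false))
      PySem.Dict.empty
  (indep2, deps2.items)

-- ===== PORT B =====
-- _group's loop, carrying the current run (k, s); emits (k, s) on each key change and at the end
def pvGroupRun (k s : Int) : List (Int × Int) → List (Int × Int)
  | [] => [(k, s)]
  | p :: rest => if p.1 = k then pvGroupRun k (s + p.2) rest else (k, s) :: pvGroupRun p.1 p.2 rest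

def pvGroup : List (Int × Int) → List (Int × Int)
  | [] => []
  | p :: rest => pvGroupRun p.1 p.2 rest

def apply_perm_to_presentation_py_alt (independent : List Int) (dependencies : List (Int × List (Int × Int))) (perm : List (Int × Int)) : List Int × (List (Int × List (Int × Int))) :=
  let indep2 := independent.map (fun i => pvPermGet perm i)
  let deps2 :=
    (PySem.Dict.ofList dependencies).items.foldl
      (fun deps2 dp =>
        deps2.insert (pvPermGet perm dp.1)
          (pvGroup (PySem.List.sorted (dp.2.map (fun jm => (pvPermGet perm jm.1, jm.2))) (fun t => t.1) false)))
      PySem.Dict.empty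
  (indep2, deps2.items)

-- ===== PRECONDITION & SPEC =====
-- A raises KeyError when a label of independent, a dependency key, or a pair's label is missing from perm
def Pre_apply_perm_to_presentation_py (independent : List Int) (dependencies : List (Int × List (Int × Int))) (perm : List (Int × Int)) : Prop :=
  (independent.all (fun i => perm.any (fun p => p.1 == i)) &&
   dependencies.all (fun dp => perm.any (fun p => p.1 == dp.1) &&
     dp.2.all (fun jm => perm.any (fun p => p.1 == jm.1)))) = true
instance (independent : List Int) (dependencies : List (Int × List (Int × Int))) (perm : List (Int × Int)) : Decidable (Pre_apply_perm_to_presentation_py independent dependencies perm) := by unfold Pre_apply_perm_to_presentation_py; infer_instance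

def pvWitness_apply_perm_to_presentation_py : List Int × (List (Int × List (Int × Int))) × (List (Int × Int)) :=
  ([0], [(0, [(1, 2), (1, 3), (0, -1)])], [(0, 3), (1, 4)])

def Spec_apply_perm_to_presentation_py (independent : List Int) (dependencies : List (Int × List (Int × Int))) (perm : List (Int × Int)) (out : List Int × (List (Int × List (Int × Int)))) : Prop := out = apply_perm_to_presentation_py_alt independent dependencies perm
instance (independent : List Int) (dependencies : List (Int × List (Int × Int))) (perm : List (Int × Int)) (out : List Int × (List (Int × List (Int × Int)))) : Decidable (Spec_apply_perm_to_presentation_py independent dependencies perm out) := by unfold Spec_apply_perm_to_presentation_py; infer_instance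

-- ===== CLAIM (what is proved, stated in full; the proofs are below) =====
def Claim_equal_apply_perm_to_presentation_py : Prop := ∀ (independent : List Int) (dependencies : List (Int × List (Int × Int))) (perm : List (Int × Int)), Dom_apply_perm_to_presentation_py independent dependencies perm → Pre_apply_perm_to_presentation_py independent dependencies perm → Spec_apply_perm_to_presentation_py independent dependencies perm (apply_perm_to_presentation_py independent dependencies perm)

-- ===== LEMMAS AND PROOFS =====

-- the canonical grouped form: distinct keys in first-occurrence order, each with the total multiplicity
def pvCanon (l : List (Int × Int)) : List (Int × Int) :=
  (PySem.List.dedup (l.map (·.1))).map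
    (fun c => (c, ((l.filter (fun p => p.1 == c)).map (·.2)).sum))

theorem pvDiscard_of_not_mem (s : List Int) (k : Int) (h : k ∉ s) : PySem.Set.discard s k = s := by
  unfold PySem.Set.discard
  rw [List.filter_eq_self]
  intro a ha
  simp
  exact fun e => h (e ▸ ha)

-- merge step: C1
theorem pvCanon_merge (k s : Int) (p : Int × Int) (rest : List (Int × Int)) (hpk : p.1 = k) :
    pvCanon ((k, s) :: p :: rest) = pvCanon ((k, s + p.2) :: rest) := by
  obtain ⟨pk, pm⟩ := p
  cases hpk
  unfold pvCanon
  have hkeys : PySem.List.dedup ((((pk, s) :: (pk, pm) :: rest).map (·.1))) =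
      PySem.List.dedup (((pk, s + pm) :: rest).map (·.1)) := by
    simp only [List.map_cons, PySem.List.dedup_eq_ofList, PySem.Set.ofList_cons]
    simp [PySem.Set.discard, List.filter_filter]
  rw [hkeys]
  apply List.map_congr_left
  intro c _
  by_cases hc : pk = c
  · cases hc; simp; ring
  · simp [hc]

-- fresh-head step: C2
theorem pvCanon_fresh (k s : Int) (l : List (Int × Int)) (h : k ∉ l.map (·.1)) :
    pvCanon ((k, s) :: l) = (k, s) :: pvCanon l := by
  unfold pvCanon
  have hkeys : PySem.List.dedup (((k, s) :: l).map (·.1)) = k :: PySem.List.dedup (l.map (·.1)) := by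
    simp only [List.map_cons, PySem.List.dedup_eq_ofList, PySem.Set.ofList_cons]
    rw [pvDiscard_of_not_mem]
    simpa [PySem.Set.mem_ofList] using h
  rw [hkeys]
  simp only [List.map_cons]
  have hhead : ((List.filter (fun p => p.1 == k) ((k, s) :: l)).map (·.2)).sum = s := by
    have : List.filter (fun p => (p.1 == k)) l = [] := by
      rw [List.filter_eq_nil_iff]
      intro p hp
      simp only [beq_iff_eq]
      intro e
      exact h (List.mem_map.mpr ⟨p, hp, e⟩)
    simp [this]
  congr 1
  · simpa using hhead
  · apply List.map_congr_left
    intro c hc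
    have hck : c ≠ k := by
      intro e; cases e
      exact h (by simpa [PySem.List.mem_dedup] using hc)
    simp [Ne.symm hck]

theorem pvGroupRun_eq_canon (ys : List (Int × Int)) : ∀ (k s : Int),
    ys.Pairwise (fun a b => a.1 ≤ b.1) → (∀ p ∈ ys, k ≤ p.1) →
    pvGroupRun k s ys = pvCanon ((k, s) :: ys) := by
  induction ys with
  | nil =>
    intro k s _ _
    simp [pvGroupRun, pvCanon, PySem.List.dedup_eq_ofList, PySem.Set.ofList]
  | cons p rest ih =>
    intro k s hpw hle
    have hpw' : rest.Pairwise (fun a b => a.1 ≤ b.1) := hpw.tail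
    have hhead : ∀ q ∈ rest, p.1 ≤ q.1 := fun q hq => List.rel_of_pairwise_cons hpw hq
    by_cases hpk : p.1 = k
    · have hle' : ∀ q ∈ rest, k ≤ q.1 := fun q hq => hpk ▸ hhead q hq
      rw [pvGroupRun, if_pos hpk, ih k (s + p.2) hpw' hle', pvCanon_merge k s p rest hpk]
    · have hkp : k < p.1 := lt_of_le_of_ne (hle p (List.mem_cons_self)) (Ne.symm hpk)
      have hfresh : k ∉ (p :: rest).map (·.1) := by
        intro hm
        rcases List.mem_map.mp hm with ⟨q, hq, he⟩
        rcases List.mem_cons.mp hq with h1 | h2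
        · exact hpk (h1 ▸ he)
        · exact absurd he.symm (ne_of_lt (lt_of_lt_of_le hkp (hhead q h2)))
      rw [pvGroupRun, if_neg hpk, ih p.1 p.2 hpw' hhead, pvCanon_fresh k s (p :: rest) hfresh]

theorem pvGroupRun_pairwise (ys : List (Int × Int)) : ∀ (k s : Int),
    ys.Pairwise (fun a b => a.1 ≤ b.1) → (∀ p ∈ ys, k ≤ p.1) →
    (pvGroupRun k s ys).Pairwise (fun a b => a.1 < b.1) ∧ ∀ q ∈ pvGroupRun k s ys, k ≤ q.1 := by
  induction ys with
  | nil => intro k s _ _; simp [pvGroupRun]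
  | cons p rest ih =>
    intro k s hpw hle
    have hpw' : rest.Pairwise (fun a b => a.1 ≤ b.1) := hpw.tail
    have hhead : ∀ q ∈ rest, p.1 ≤ q.1 := fun q hq => List.rel_of_pairwise_cons hpw hq
    by_cases hpk : p.1 = k
    · have hle' : ∀ q ∈ rest, k ≤ q.1 := fun q hq => hpk ▸ hhead q hq
      rw [pvGroupRun, if_pos hpk]
      exact ih k (s + p.2) hpw' hle'
    · have hkp : k < p.1 := lt_of_le_of_ne (hle p (List.mem_cons_self)) (Ne.symm hpk)
      obtain ⟨h1, h2⟩ := ih p.1 p.2 hpw' hhead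
      rw [pvGroupRun, if_neg hpk]
      refine ⟨List.pairwise_cons.mpr ⟨fun q hq => lt_of_lt_of_le hkp (h2 q hq), h1⟩, ?_⟩
      intro q hq
      rcases List.mem_cons.mp hq with h | h
      · exact le_of_eq (by rw [h])
      · exact le_of_lt (lt_of_lt_of_le hkp (h2 q h))

theorem pvGroup_sorted_eq_canon (xs : List (Int × Int)) :
    pvGroup (PySem.List.sorted xs (fun t => t.1) false) = pvCanon (PySem.List.sorted xs (fun t => t.1) false) := by
  have hpw := PySem.List.sorted_pairwise xs (fun t : Int × Int => t.1)
  cases hs : PySem.List.sorted xs (fun t => t.1) false with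
  | nil => simp [pvGroup, pvCanon]
  | cons p rest =>
    rw [hs] at hpw
    rw [pvGroup, pvGroupRun_eq_canon rest p.1 p.2 hpw.tail
      (fun q hq => List.rel_of_pairwise_cons hpw hq)]

theorem pvGroup_sorted_pairwise (xs : List (Int × Int)) :
    (pvGroup (PySem.List.sorted xs (fun t => t.1) false)).Pairwise (fun a b => a.1 < b.1) := by
  have hpw := PySem.List.sorted_pairwise xs (fun t : Int × Int => t.1)
  cases hs : PySem.List.sorted xs (fun t => t.1) false with
  | nil => simp [pvGroup]
  | cons p rest =>
    rw [hs] at hpw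
    exact (pvGroupRun_pairwise rest p.1 p.2 hpw.tail
      (fun q hq => List.rel_of_pairwise_cons hpw hq)).1

theorem pvAccGetD (xs : List (Int × Int)) : ∀ (d : PySem.Dict Int Int) (c : Int),
    ((xs.foldl (fun acc p => acc.modify p.1 0 (fun v => v + p.2)) d).getD c 0) =
      d.getD c 0 + ((xs.filter (fun p => p.1 == c)).map (·.2)).sum := by
  induction xs with
  | nil => intro d c; simp
  | cons p rest ih =>
    intro d c
    rw [List.foldl_cons, ih]
    by_cases hc : c = p.1
    · cases hc; simp [PySem.Dict.getD_modify_self]; ring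
    · simp [PySem.Dict.getD_modify, hc, Ne.symm hc]

theorem pvAccItems (xs : List (Int × Int)) :
    (xs.foldl (fun acc p => acc.modify p.1 0 (fun v => v + p.2)) PySem.Dict.empty).items =
      (PySem.Set.ofList (xs.map (·.1))).map
        (fun c => (c, ((xs.filter (fun p => p.1 == c)).map (·.2)).sum)) := by
  set d := xs.foldl (fun acc p => acc.modify p.1 0 (fun v => v + p.2)) PySem.Dict.empty with hd
  have hkeys : d.keys = PySem.Set.ofList (xs.map (·.1)) := by
    rw [hd, PySem.Dict.keys_foldl_modify_key]
    simp [PySem.Dict.keys_empty, PySem.Set.update_nil_left]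
  have hnd : d.keys.Nodup := by rw [hkeys]; exact PySem.Set.nodup_ofList _
  rw [PySem.Dict.items_eq_map_keys d hnd 0, hkeys]
  apply List.map_congr_left
  intro c _
  rw [hd, pvAccGetD]
  simp

theorem pvInner (xs : List (Int × Int)) :
    PySem.List.sorted (xs.foldl (fun acc p => acc.modify p.1 0 (fun v => v + p.2)) PySem.Dict.empty).items (fun x => x.1) false =
      pvGroup (PySem.List.sorted xs (fun t => t.1) false) := by
  apply PySem.List.sorted_eq_of_perm_of_pairwise_lt
  · -- Perm
    rw [pvGroup_sorted_eq_canon, pvAccItems]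
    unfold pvCanon
    have hfix : (fun c => (c, (((PySem.List.sorted xs (fun t => t.1) false).filter (fun p => p.1 == c)).map (·.2)).sum)) =
        (fun c : Int => (c, ((xs.filter (fun p => p.1 == c)).map (·.2)).sum)) := by
      funext c
      have hperm : (PySem.List.sorted xs (fun t => t.1) false).Perm xs := PySem.List.sorted_perm _ _ _
      rw [List.Perm.sum_eq ((hperm.filter _).map _)]
    rw [hfix]
    apply List.Perm.map
    rw [PySem.List.dedup_eq_ofList]
    apply (List.perm_ext_iff_of_nodup (PySem.Set.nodup_ofList _) (PySem.Set.nodup_ofList _)).mpr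
    intro c
    simp only [PySem.Set.mem_ofList, List.mem_map]
    constructor
    · rintro ⟨p, hp, he⟩
      exact ⟨p, (PySem.List.mem_sorted _ _ _ _).mp hp, he⟩
    · rintro ⟨p, hp, he⟩
      exact ⟨p, (PySem.List.mem_sorted _ _ _ _).mpr hp, he⟩
  · exact pvGroup_sorted_pairwise xs

-- ===== VERDICT (by name: the statement is the Claim_ definition above) =====
theorem apply_perm_to_presentation_py_spec : Claim_equal_apply_perm_to_presentation_py := by
  intro independent dependencies perm _ _
  show apply_perm_to_presentation_py independent dependencies perm =
    apply_perm_to_presentation_py_alt independent dependencies perm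
  have hfn : (fun (deps2 : PySem.Dict Int (List (Int × Int))) (dp : Int × List (Int × Int)) =>
        PySem.Dict.insert deps2 (pvPermGet perm dp.1)
          (PySem.List.sorted (dp.2.foldl
              (fun acc jm => PySem.Dict.modify acc (pvPermGet perm jm.1) 0 (fun v => v + jm.2))
              PySem.Dict.empty).items (fun x => x.1) false))
      = (fun deps2 dp => PySem.Dict.insert deps2 (pvPermGet perm dp.1)
          (pvGroup (PySem.List.sorted (dp.2.map (fun jm => (pvPermGet perm jm.1, jm.2))) (fun t => t.1) false))) := by
    funext deps2 dp
    congr 1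
    have hmap : dp.2.foldl
        (fun acc jm => PySem.Dict.modify acc (pvPermGet perm jm.1) 0 (fun v => v + jm.2))
        PySem.Dict.empty =
        (dp.2.map (fun jm => (pvPermGet perm jm.1, jm.2))).foldl
          (fun acc p => acc.modify p.1 0 (fun v => v + p.2)) PySem.Dict.empty := by
      rw [List.foldl_map]
    rw [hmap, pvInner]
  simp only [apply_perm_to_presentation_py, apply_perm_to_presentation_py_alt]
  rw [hfn]
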